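-- pv_equiv track=rewrite | github.com/Oracking/advent-of-code-2023 | solutions/day_8/part_2.py | convert_traversed_nodes_to_z_points
-- ===== SOURCE A (Python) =====
-- def convert_traversed_nodes_to_z_points(traversed_nodes_list, loop_back_index):
--     movement_count = 0
--     index = 1
--     z_points = []
--     for node, _ in traversed_nodes_list[1:]:
--         movement_count += 1
--         if node.endswith("Z"):
--             z_points.append((1, movement_count))
--             index += 1
--             movement_count = 0
--
--     z_points.append((0, movement_count+1 + z_points[0][1] - loop_back_index))
--     return z_points
-- ===== SOURCE B (Python) =====
-- def convert_traversed_nodes_to_z_points(traversed_nodes_list, loop_back_index):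
--     tail = traversed_nodes_list[1:]
--     positions = [i for i, (node, _) in enumerate(tail, start=1) if node.endswith("Z")]
--     z_points = [(1, p - q) for p, q in zip(positions, [0] + positions[:-1])]
--     z_points.append((0, len(tail) - positions[-1] + 1 + positions[0] - loop_back_index))
--     return z_points
-- ===== Notes on version B (the rewrite author's own statement) =====
-- stated objective: alternative
-- what changed: Replaces the single stateful loop (running movement counter reset at each Z) by a positions-first decomposition: one comprehension collects the 1-based positions of Z-ending nodes, gaps are taken as differences of consecutive positions, and the trailing entry is computed in closed form from the first and last position.
import Mathlib
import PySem

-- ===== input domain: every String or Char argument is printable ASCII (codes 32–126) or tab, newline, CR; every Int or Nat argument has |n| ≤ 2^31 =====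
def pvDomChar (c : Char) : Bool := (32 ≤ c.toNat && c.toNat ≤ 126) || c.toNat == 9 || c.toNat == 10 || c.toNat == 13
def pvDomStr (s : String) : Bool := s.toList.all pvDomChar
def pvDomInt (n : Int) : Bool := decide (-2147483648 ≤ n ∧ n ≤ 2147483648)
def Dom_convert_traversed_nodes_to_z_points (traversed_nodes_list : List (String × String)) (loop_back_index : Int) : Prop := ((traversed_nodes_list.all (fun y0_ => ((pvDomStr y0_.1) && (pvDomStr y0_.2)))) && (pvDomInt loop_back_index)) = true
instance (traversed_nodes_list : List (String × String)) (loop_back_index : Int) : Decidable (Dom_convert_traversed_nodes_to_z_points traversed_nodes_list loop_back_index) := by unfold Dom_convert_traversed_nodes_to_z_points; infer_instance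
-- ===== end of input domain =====

-- B recomputes the same z-points from the list of Z positions (gaps of consecutive positions
-- plus a closed-form trailing entry) instead of A's running counter; alternative decomposition,
-- same cost.

-- ===== PORT A =====
def convert_traversed_nodes_to_z_points (traversed_nodes_list : List (String × String)) (loop_back_index : Int) : List (Int × Int) :=
  let st := (PySem.List.slice traversed_nodes_list (some 1) none).foldl
    (fun (st : Int × Int × List (Int × Int)) nodePair =>
      let mc := st.1 + 1
      if PySem.Str.endswith nodePair.1 "Z" then
        (0, st.2.1 + 1, st.2.2 ++ [(1, mc)])
      else
        (mc, st.2.1, st.2.2))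
    (0, 1, [])
  match st.2.2 with
  | [] => []  -- Python raises IndexError on z_points[0]; excluded by Pre_
  | (_, f) :: _ => st.2.2 ++ [(0, st.1 + 1 + f - loop_back_index)]

-- ===== PORT B =====
def convert_traversed_nodes_to_z_points_alt (traversed_nodes_list : List (String × String)) (loop_back_index : Int) : List (Int × Int) :=
  let tail := PySem.List.slice traversed_nodes_list (some 1) none
  let positions : List Int := (PySem.List.enumerate tail 1).filterMap
    (fun ip => if PySem.Str.endswith ip.2.1 "Z" then some ip.1 else none)
  let z_points : List (Int × Int) :=
    (positions.zip (0 :: positions.dropLast)).map (fun pq => ((1 : Int), pq.1 - pq.2))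
  match positions.head?, positions.getLast? with
  | some p0, some pl => z_points ++ [(0, (tail.length : Int) - pl + 1 + p0 - loop_back_index)]
  | _, _ => []  -- Python raises IndexError on positions[-1]; excluded by Pre_

-- ===== PRECONDITION & SPEC =====
-- Pre_ excludes exactly the inputs with no Z-ending node after the first element,
-- on which both Pythons raise IndexError.
def Pre_convert_traversed_nodes_to_z_points (traversed_nodes_list : List (String × String)) (_loop_back_index : Int) : Prop :=
  (traversed_nodes_list.drop 1).any (fun p => PySem.Str.endswith p.1 "Z") = true
instance (traversed_nodes_list : List (String × String)) (loop_back_index : Int) : Decidable (Pre_convert_traversed_nodes_to_z_points traversed_nodes_list loop_back_index) := by unfold Pre_convert_traversed_nodes_to_z_points; infer_instance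

def pvWitness_convert_traversed_nodes_to_z_points : (List (String × String)) × Int :=
  ([("AAA", "x"), ("BBZ", "y"), ("CCC", "z"), ("DDZ", "w")], 2)

def Spec_convert_traversed_nodes_to_z_points (traversed_nodes_list : List (String × String)) (loop_back_index : Int) (out : List (Int × Int)) : Prop := out = convert_traversed_nodes_to_z_points_alt traversed_nodes_list loop_back_index
instance (traversed_nodes_list : List (String × String)) (loop_back_index : Int) (out : List (Int × Int)) : Decidable (Spec_convert_traversed_nodes_to_z_points traversed_nodes_list loop_back_index out) := by unfold Spec_convert_traversed_nodes_to_z_points; infer_instance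

-- ===== CLAIM (what is proved, stated in full; the proofs are below) =====
def Claim_equal_convert_traversed_nodes_to_z_points : Prop := ∀ (traversed_nodes_list : List (String × String)) (loop_back_index : Int), Dom_convert_traversed_nodes_to_z_points traversed_nodes_list loop_back_index → Pre_convert_traversed_nodes_to_z_points traversed_nodes_list loop_back_index → Spec_convert_traversed_nodes_to_z_points traversed_nodes_list loop_back_index (convert_traversed_nodes_to_z_points traversed_nodes_list loop_back_index)

-- ===== LEMMAS AND PROOFS =====

-- A's loop, written as a recursion on the tail with the running counter as argument:
-- returns the final counter and the list of appended (1, gap) pairs.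
def specA (mc : Int) (xs : List (String × String)) : Int × List (Int × Int) :=
  match xs with
  | [] => (mc, [])
  | x :: xs =>
    if PySem.Str.endswith x.1 "Z" then
      let r := specA 0 xs
      (r.1, (1, mc + 1) :: r.2)
    else specA (mc + 1) xs

-- positions of Z-ending nodes, counted from k
def posF (k : Int) (xs : List (String × String)) : List Int :=
  match xs with
  | [] => []
  | x :: xs => if PySem.Str.endswith x.1 "Z" then k :: posF (k + 1) xs else posF (k + 1) xs

def gapsList (prev : Int) (ps : List Int) : List (Int × Int) :=
  match ps with
  | [] => []
  | p :: ps => (1, p - prev) :: gapsList p ps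

theorem foldA_eq_specA (xs : List (String × String)) (mc idx : Int) (zp : List (Int × Int)) :
    xs.foldl
      (fun (st : Int × Int × List (Int × Int)) nodePair =>
        let mc := st.1 + 1
        if PySem.Str.endswith nodePair.1 "Z" then
          (0, st.2.1 + 1, st.2.2 ++ [(1, mc)])
        else
          (mc, st.2.1, st.2.2))
      (mc, idx, zp)
    = ((specA mc xs).1, idx + (specA mc xs).2.length, zp ++ (specA mc xs).2) := by
  induction xs generalizing mc idx zp with
  | nil => simp [specA]
  | cons x xs ih =>
    simp only [List.foldl_cons, specA]
    by_cases h : PySem.Str.endswith x.1 "Z"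
    · simp only [if_pos h, ih, List.length_cons, List.append_assoc, List.singleton_append,
        Prod.mk.injEq]
      and_intros <;> first | trivial | (push_cast; ring_nf)
    · simp only [if_neg h, ih]

theorem specA_eq_posF (xs : List (String × String)) (k z : Int) :
    specA (k - 1 - z) xs
      = (k - 1 + xs.length - (posF k xs).getLastD z, gapsList z (posF k xs)) := by
  induction xs generalizing k z with
  | nil => simp [specA, posF, gapsList]
  | cons x xs ih =>
    simp only [specA, posF]
    by_cases h : PySem.Str.endswith x.1 "Z"
    · simp only [if_pos h]
      have hi := ih (k + 1) k
      rw [show (k + 1) - 1 - k = (0 : Int) by ring] at hi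
      rw [hi]
      simp only [Prod.mk.injEq, gapsList, List.length_cons, List.getLastD_cons]
      and_intros <;> first | trivial | (push_cast; ring_nf)
    · simp only [if_neg h]
      rw [show k - 1 - z + 1 = (k + 1) - 1 - z by ring, ih (k + 1) z]
      simp only [Prod.mk.injEq, List.length_cons]
      and_intros <;> first | trivial | (push_cast; ring_nf)

theorem enum_filterMap_eq_posF (xs : List (String × String)) (k : Int) :
    (PySem.List.enumerate xs k).filterMap
      (fun ip => if PySem.Str.endswith ip.2.1 "Z" then some ip.1 else none)
    = posF k xs := by
  induction xs generalizing k with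
  | nil => simp [PySem.List.enumerate_nil, posF]
  | cons x xs ih =>
    rw [PySem.List.enumerate_cons]
    by_cases h : PySem.Str.endswith x.1 "Z"
    · simp only [List.filterMap_cons, posF, if_pos h, ih]
    · simp only [List.filterMap_cons, posF, if_neg h, ih]

theorem zip_map_eq_gapsList (ps : List Int) (prev : Int) :
    (ps.zip (prev :: ps.dropLast)).map (fun pq => ((1 : Int), pq.1 - pq.2))
      = gapsList prev ps := by
  induction ps generalizing prev with
  | nil => simp [gapsList]
  | cons p ps ih =>
    cases ps with
    | nil => simp [gapsList]
    | cons q ps' =>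
      have h := ih p
      simp only [List.dropLast_cons₂, List.zip_cons_cons, List.map_cons, gapsList,
        List.cons.injEq, true_and] at h ⊢
      exact h

theorem posF_any (xs : List (String × String)) (k : Int)
    (h : xs.any (fun p => PySem.Str.endswith p.1 "Z") = true) : posF k xs ≠ [] := by
  induction xs generalizing k with
  | nil => simp at h
  | cons x xs ih =>
    simp only [posF]
    cases hb : PySem.Str.endswith x.1 "Z" with
    | true => simp
    | false =>
      rw [if_neg (by simp [hb])]
      rw [List.any_cons, hb, Bool.false_or] at h
      exact ih (k + 1) h

-- ===== VERDICT (by name: the statement is the Claim_ definition above) =====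
theorem convert_traversed_nodes_to_z_points_spec : Claim_equal_convert_traversed_nodes_to_z_points := by
  intro l lb _ hpre
  unfold Spec_convert_traversed_nodes_to_z_points convert_traversed_nodes_to_z_points
    convert_traversed_nodes_to_z_points_alt
  simp only [PySem.List.slice_from_one, foldA_eq_specA, enum_filterMap_eq_posF,
    zip_map_eq_gapsList]
  have hs := specA_eq_posF l.tail 1 0
  norm_num at hs
  rw [hs]
  have hne : posF 1 l.tail ≠ [] := posF_any _ _ (by
    unfold Pre_convert_traversed_nodes_to_z_points at hpre
    rwa [List.drop_one] at hpre)
  rcases hp : posF 1 l.tail with _ | ⟨p0, rest⟩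
  · exact absurd hp hne
  · rcases hgl : (p0 :: rest).getLast? with _ | gl
    · simp at hgl
    · simp only [gapsList, List.head?_cons, Option.getD_some]
      norm_num
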